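-- pv_equiv track=rewrite | github.com/sbourdeauducq/dvidebug | process_dvi.py | dma_workaround
-- ===== SOURCE A (Python) =====
-- def dma_workaround(l):
-- 	r = []
-- 	it = iter(l)
-- 	while True:
-- 		try:
-- 			r += reversed([next(it) for i in range(8)])
-- 		except StopIteration:
-- 			return r
-- ===== SOURCE B (Python) =====
-- def dma_workaround(l):
--     # One pass over block-reversed indices: element i of the output comes from
--     # index i + 7 - 2*(i % 8) (the position of i reflected inside its 8-block);
--     # the range bound drops any partial trailing block.
--     return [l[i + 7 - 2 * (i % 8)] for i in range(len(l) - len(l) % 8)]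
-- ===== Notes on version B (the rewrite author's own statement) =====
-- stated objective: alternative
-- what changed: Replaces the iterator while/next/try-except chunk-and-reverse loop with a single list comprehension over an index permutation: output position i reads input index i + 7 - 2*(i % 8), with the range bound len(l) - len(l) % 8 dropping the partial tail.
import Mathlib
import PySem

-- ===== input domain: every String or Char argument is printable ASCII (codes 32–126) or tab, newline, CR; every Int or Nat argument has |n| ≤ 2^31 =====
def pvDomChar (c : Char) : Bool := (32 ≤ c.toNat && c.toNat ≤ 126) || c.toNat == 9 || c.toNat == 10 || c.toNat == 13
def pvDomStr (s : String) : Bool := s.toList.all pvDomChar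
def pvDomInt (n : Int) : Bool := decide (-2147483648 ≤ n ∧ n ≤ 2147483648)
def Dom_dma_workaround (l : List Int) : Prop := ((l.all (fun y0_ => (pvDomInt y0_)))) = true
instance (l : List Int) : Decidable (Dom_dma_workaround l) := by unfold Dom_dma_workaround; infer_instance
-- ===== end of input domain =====

-- B replaces A's iterator while/next/try-except chunk-and-reverse loop by one list
-- comprehension over the index permutation i ↦ i + 7 - 2*(i % 8) (alternative decomposition).

-- ===== PORT A =====
-- A's while-loop: each iteration takes the next 8 iterator elements (the match arm),
-- appends them reversed to r; StopIteration (fewer than 8 left) returns r.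
def dmaLoopA (it : List Int) (r : List Int) : List Int :=
  match it with
  | a :: b :: c :: d :: e :: f :: g :: h :: rest =>
      dmaLoopA rest (r ++ [h, g, f, e, d, c, b, a])
  | _ => r

def dma_workaround (l : List Int) : List Int := dmaLoopA l []

-- ===== PORT B =====
def dma_workaround_alt (l : List Int) : List Int :=
  (PySem.List.pyRange 0 ((l.length : Int) - PySem.Int.mod (l.length : Int) 8) 1).map
    (fun i => PySem.List.pyGetD l (i + 7 - 2 * PySem.Int.mod i 8) 0)

-- ===== PRECONDITION & SPEC =====
def Spec_dma_workaround (l : List Int) (out : List Int) : Prop := out = dma_workaround_alt l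
instance (l : List Int) (out : List Int) : Decidable (Spec_dma_workaround l out) := by unfold Spec_dma_workaround; infer_instance

-- ===== CLAIM (what is proved, stated in full; the proofs are below) =====
def Claim_equal_dma_workaround : Prop := ∀ (l : List Int), Dom_dma_workaround l → Spec_dma_workaround l (dma_workaround l)

-- ===== LEMMAS AND PROOFS =====

lemma mod8_cast (m : Nat) : PySem.Int.mod (m : Int) 8 = ((m % 8 : Nat) : Int) := by
  exact_mod_cast PySem.Int.mod_natCast m 8

lemma pyGetD_cons_succ (x : Int) (xs : List Int) (i : Int) (hi : 0 ≤ i) :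
    PySem.List.pyGetD (x :: xs) (i + 1) 0 = PySem.List.pyGetD xs i 0 := by
  obtain ⟨n, rfl⟩ := Int.eq_ofNat_of_zero_le hi
  rw [show ((n:Int) + 1) = ((n+1 : Nat) : Int) by push_cast; ring]
  rw [PySem.List.pyGetD_natCast, PySem.List.pyGetD_natCast]
  simp [List.getD]

lemma pyGetD_cons8 (a b c d e f g h : Int) (xs : List Int) (j : Int) (hj : 0 ≤ j) :
    PySem.List.pyGetD (a::b::c::d::e::f::g::h::xs) (j + 8) 0 = PySem.List.pyGetD xs j 0 := by
  rw [show j+8 = (j+7)+1 by ring, pyGetD_cons_succ _ _ _ (by omega)]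
  rw [show j+7 = (j+6)+1 by ring, pyGetD_cons_succ _ _ _ (by omega)]
  rw [show j+6 = (j+5)+1 by ring, pyGetD_cons_succ _ _ _ (by omega)]
  rw [show j+5 = (j+4)+1 by ring, pyGetD_cons_succ _ _ _ (by omega)]
  rw [show j+4 = (j+3)+1 by ring, pyGetD_cons_succ _ _ _ (by omega)]
  rw [show j+3 = (j+2)+1 by ring, pyGetD_cons_succ _ _ _ (by omega)]
  rw [show j+2 = (j+1)+1 by ring, pyGetD_cons_succ _ _ _ (by omega)]
  rw [pyGetD_cons_succ _ _ _ hj]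

lemma alt_short (l : List Int) (h : l.length < 8) : dma_workaround_alt l = [] := by
  unfold dma_workaround_alt
  rw [mod8_cast, show l.length % 8 = l.length from Nat.mod_eq_of_lt h]
  rw [PySem.List.pyRange_one_eq_nil (by omega)]
  simp

lemma alt_block (a b c d e f g h : Int) (rest : List Int) :
    dma_workaround_alt (a :: b :: c :: d :: e :: f :: g :: h :: rest)
      = [h, g, f, e, d, c, b, a] ++ dma_workaround_alt rest := by
  unfold dma_workaround_alt
  have hm : rest.length % 8 ≤ rest.length := Nat.mod_le _ _
  have hlen : (((a :: b :: c :: d :: e :: f :: g :: h :: rest).length : Int))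
      = (rest.length : Int) + 8 := by simp; ring
  rw [hlen]
  have hmod : PySem.Int.mod ((rest.length : Int) + 8) 8 = ((rest.length % 8 : Nat) : Int) := by
    rw [show ((rest.length : Int) + 8) = ((rest.length + 8 : Nat) : Int) by push_cast; ring,
        mod8_cast]
    congr 1
    omega
  rw [hmod]
  rw [show ((rest.length : Int) + 8 - ((rest.length % 8 : Nat) : Int))
      = 8 + ((rest.length : Int) - ((rest.length % 8 : Nat) : Int)) by ring]
  rw [PySem.List.pyRange_one_append 0 8 (8 + ((rest.length : Int) - ((rest.length % 8 : Nat) : Int)))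
      (by omega) (by push_cast; omega)]
  rw [List.map_append]
  congr 1
  · rw [show PySem.List.pyRange 0 8 1 = [0,1,2,3,4,5,6,7] from by decide]
    simp only [List.map]
    rw [show ((0:Int) + 7 - 2 * PySem.Int.mod 0 8) = 7 from by decide,
        show ((1:Int) + 7 - 2 * PySem.Int.mod 1 8) = 6 from by decide,
        show ((2:Int) + 7 - 2 * PySem.Int.mod 2 8) = 5 from by decide,
        show ((3:Int) + 7 - 2 * PySem.Int.mod 3 8) = 4 from by decide,
        show ((4:Int) + 7 - 2 * PySem.Int.mod 4 8) = 3 from by decide,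
        show ((5:Int) + 7 - 2 * PySem.Int.mod 5 8) = 2 from by decide,
        show ((6:Int) + 7 - 2 * PySem.Int.mod 6 8) = 1 from by decide,
        show ((7:Int) + 7 - 2 * PySem.Int.mod 7 8) = 0 from by decide]
    simp [PySem.List.pyGetD_ofNat', List.getD]
  · rw [mod8_cast rest.length, PySem.List.pyRange_one 8, PySem.List.pyRange_one 0,
        List.map_map, List.map_map]
    rw [show (8 + ((rest.length : Int) - ((rest.length % 8 : Nat) : Int)) - 8)
        = ((rest.length : Int) - ((rest.length % 8 : Nat) : Int)) - 0 by ring]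
    congr 1
    funext k
    simp only [Function.comp_apply]
    have h1 : (8 + (k:Int)) + 7 - 2 * PySem.Int.mod (8 + (k:Int)) 8
        = ((0 + (k:Int)) + 7 - 2 * PySem.Int.mod (0 + (k:Int)) 8) + 8 := by
      rw [show (8 + (k:Int)) = ((k + 8 : Nat) : Int) by push_cast; ring,
          show (0 + (k:Int)) = ((k : Nat) : Int) by omega,
          mod8_cast, mod8_cast, show (k+8) % 8 = k % 8 by omega]
      push_cast; ring
    rw [h1, pyGetD_cons8 _ _ _ _ _ _ _ _ _ _ (by
      rw [show (0 + (k:Int)) = ((k : Nat) : Int) by omega, mod8_cast]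
      have h2 : k % 8 ≤ k := Nat.mod_le _ _
      have h3 : k % 8 < 8 := Nat.mod_lt _ (by omega)
      push_cast; omega)]

lemma loopA_eq (it : List Int) (r : List Int) :
    dmaLoopA it r = r ++ dma_workaround_alt it := by
  induction it, r using dmaLoopA.induct with
  | case1 r a b c d e f g h rest ih =>
      rw [dmaLoopA, ih, alt_block, List.append_assoc]
  | case2 t r hne =>
      rcases t with _|⟨a, _|⟨b, _|⟨c, _|⟨d, _|⟨e, _|⟨f, _|⟨g, _|⟨h, rest⟩⟩⟩⟩⟩⟩⟩⟩
      all_goals first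
        | exact (hne _ _ _ _ _ _ _ _ _ rfl).elim
        | (rw [alt_short _ (by simp)]; simp [dmaLoopA])

-- ===== VERDICT (by name: the statement is the Claim_ definition above) =====
theorem dma_workaround_spec : Claim_equal_dma_workaround := by
  intro l _
  unfold Spec_dma_workaround dma_workaround
  simpa using loopA_eq l []
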